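-- pv_equiv track=rewrite | github.com/budgefeeney/sidetopics | src/run/selectusers.py | select_users
-- ===== SOURCE A (Python) =====
-- import operator
--
-- SortTweet = False
--
-- def select_users(user_counts, group_contribs):
--     '''
--     Given the contributions from each group, select the users which
--     we need to include to hit our target tweet count.
--     :param user_counts:
--     :param group_contribs:
--     :return: the list of users to process
--     '''
--     selected_users = set()
--     for group, contrib in group_contribs.items():
--         acc = 0
--         sorted_users = sorted(user_counts[group].items(), key=operator.itemgetter(1)) \
--             if SortTweet else [(k,v) for k,v in user_counts[group].items()]
--
--         u = []
--         while acc < contrib and len(sorted_users) > 0: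
--             acc += sorted_users[-1][1]
--             selected_users.add (sorted_users[-1][0])
--             u.append(sorted_users[-1][0])
--             del sorted_users[-1]
--
--         print ("%25s  ->   %2d   -> %s" % (group, len(u), str(u)))
--
--     return selected_users
-- ===== SOURCE B (Python) =====
-- import operator
--
-- SortTweet = False
--
-- def select_users(user_counts, group_contribs):
--     selected_users = set()
--     for group, contrib in group_contribs.items():
--         vals = sorted(user_counts[group].items(), key=operator.itemgetter(1)) \
--             if SortTweet else list(user_counts[group].items())
--         vals.reverse()
--         # prefix-sum table: psum[k] = sum of the first k counts in tail-first order
--         psum = [0]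
--         for _, c in vals:
--             psum.append(psum[-1] + c)
--         # cutoff = smallest k with psum[k] >= contrib (0 when contrib <= 0), else take all
--         cutoff = next((k for k, s in enumerate(psum) if s >= contrib), len(vals))
--         u = [name for name, _ in vals[:cutoff]]
--         print("%25s  ->   %2d   -> %s" % (group, len(u), str(u)))
--         selected_users.update(u)
--     return selected_users
-- ===== Notes on version B (the rewrite author's own statement) =====
-- stated objective: alternative
-- what changed: A pops users off the tail of a mutable list in a while-loop that interleaves accumulation, set insertion and list deletion; B reverses the list once, builds a prefix-sum table, finds the cutoff index in it and takes a single slice, then unions it into the set.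
import Mathlib
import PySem

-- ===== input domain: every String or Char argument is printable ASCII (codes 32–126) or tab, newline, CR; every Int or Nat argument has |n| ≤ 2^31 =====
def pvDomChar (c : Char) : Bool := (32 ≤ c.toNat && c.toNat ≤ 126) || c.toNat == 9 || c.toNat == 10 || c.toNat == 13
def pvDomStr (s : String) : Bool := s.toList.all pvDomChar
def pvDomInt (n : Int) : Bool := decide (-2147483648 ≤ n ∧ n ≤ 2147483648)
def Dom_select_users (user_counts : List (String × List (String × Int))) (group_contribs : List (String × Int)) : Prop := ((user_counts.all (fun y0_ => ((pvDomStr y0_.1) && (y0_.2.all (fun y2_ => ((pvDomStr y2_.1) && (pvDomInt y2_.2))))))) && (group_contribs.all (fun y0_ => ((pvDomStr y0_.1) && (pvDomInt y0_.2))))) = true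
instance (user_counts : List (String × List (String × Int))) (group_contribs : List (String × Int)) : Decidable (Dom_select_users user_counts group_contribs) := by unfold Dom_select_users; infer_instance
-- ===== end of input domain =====

-- B replaces A's destructive tail-popping while-loop with reverse + a prefix-sum table + a
-- single cutoff search (different decomposition, same cost); equivalence is about the return
-- value only (A also prints per group; B prints the identical lines).


-- ===== PORT A =====
-- module constant SortTweet = False
def pySortTweet : Bool := false

-- the while-loop: while acc < contrib and len(sorted_users) > 0: pop sorted_users[-1]
-- (su[-1] is pyGetD su (-1); 'del su[-1]' is dropLast); returns (selected_users, u)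
def suLoopA (contrib : Int) (acc : Int) (su : List (String × Int))
    (sel : PySem.Set String) (u : List String) : PySem.Set String × List String :=
  if acc < contrib ∧ su ≠ [] then
    let last := PySem.List.pyGetD su (-1) ("", 0)
    suLoopA contrib (acc + last.2) su.dropLast (PySem.Set.add sel last.1) (u ++ [last.1])
  else (sel, u)
termination_by su.length
decreasing_by
  rename_i h
  have : su.length ≠ 0 := fun hn => h.2 (List.eq_nil_of_length_eq_zero hn)
  simp [List.length_dropLast]; omega

def select_users (user_counts : List (String × List (String × Int))) (group_contribs : List (String × Int)) : List String :=
  group_contribs.foldl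
    (fun selected_users p =>
      -- sorted_users = sorted(user_counts[group].items(), key=itemgetter(1)) if SortTweet
      --                else [(k,v) for k,v in user_counts[group].items()]
      let sorted_users : List (String × Int) :=
        if pySortTweet = true then
          PySem.List.sorted ((PySem.Dict.mk user_counts).getD p.1 []) (fun kv => kv.2)
        else ((PySem.Dict.mk user_counts).getD p.1 []).map (fun kv => (kv.1, kv.2))
      (suLoopA p.2 0 sorted_users selected_users []).1)
    PySem.Set.empty

-- ===== PORT B =====
def select_users_alt (user_counts : List (String × List (String × Int))) (group_contribs : List (String × Int)) : List String :=
  group_contribs.foldl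
    (fun selected_users p =>
      let vals0 : List (String × Int) :=
        if pySortTweet = true then
          PySem.List.sorted ((PySem.Dict.mk user_counts).getD p.1 []) (fun kv => kv.2)
        else (PySem.Dict.mk user_counts).getD p.1 []
      let vals := vals0.reverse
      -- psum = [0]; for _, c in vals: psum.append(psum[-1] + c)
      let psum : List Int := vals.foldl (fun ps q => ps ++ [PySem.List.pyGetD ps (-1) 0 + q.2]) [0]
      -- cutoff = next((k for k, s in enumerate(psum) if s >= contrib), len(vals))
      let cutoff : Int :=
        (((PySem.List.enumerate psum).find? (fun ks => decide (p.2 ≤ ks.2))).map Prod.fst).getD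
          (PySem.List.len vals)
      -- u = [name for name, _ in vals[:cutoff]]
      let u := (PySem.List.slice vals none (some cutoff)).map Prod.fst
      PySem.Set.update selected_users u)
    PySem.Set.empty

-- ===== PRECONDITION & SPEC =====
-- Pre_: every group named in group_contribs must be a key of user_counts,
-- otherwise Python's user_counts[group] raises KeyError.
def Pre_select_users (user_counts : List (String × List (String × Int))) (group_contribs : List (String × Int)) : Prop :=
  ∀ p ∈ group_contribs, (PySem.Dict.mk user_counts).contains p.1 = true
instance (user_counts : List (String × List (String × Int))) (group_contribs : List (String × Int)) : Decidable (Pre_select_users user_counts group_contribs) := by unfold Pre_select_users; infer_instance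

def pvWitness_select_users : (List (String × List (String × Int))) × (List (String × Int)) :=
  ([("g", [("u", 1), ("v", 3)])], [("g", 2)])

def Spec_select_users (user_counts : List (String × List (String × Int))) (group_contribs : List (String × Int)) (out : List String) : Prop := out = select_users_alt user_counts group_contribs
instance (user_counts : List (String × List (String × Int))) (group_contribs : List (String × Int)) (out : List String) : Decidable (Spec_select_users user_counts group_contribs out) := by unfold Spec_select_users; infer_instance

-- ===== CLAIM (what is proved, stated in full; the proofs are below) =====
def Claim_equal_select_users : Prop := ∀ (user_counts : List (String × List (String × Int))) (group_contribs : List (String × Int)), Dom_select_users user_counts group_contribs → Pre_select_users user_counts group_contribs → Spec_select_users user_counts group_contribs (select_users user_counts group_contribs)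

-- ===== LEMMAS AND PROOFS =====

-- what A's while-loop takes from the tail, phrased over the REVERSED list, front-to-back
def takeW (contrib : Int) : Int → List (String × Int) → List String
  | _, [] => []
  | acc, q :: t => if acc < contrib then q.1 :: takeW contrib (acc + q.2) t else []

-- the running prefix sums starting from a
def tailSums (a : Int) : List (String × Int) → List Int
  | [] => []
  | q :: t => (a + q.2) :: tailSums (a + q.2) t

lemma suLoopA_reverse (contrib : Int) :
    ∀ (rev : List (String × Int)) (acc : Int) (sel : PySem.Set String) (u : List String),
      suLoopA contrib acc rev.reverse sel u =
        (PySem.Set.update sel (takeW contrib acc rev), u ++ takeW contrib acc rev) := by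
  intro rev
  induction rev with
  | nil => intro acc sel u; rw [suLoopA]; simp [takeW, PySem.Set.update]
  | cons q t ih =>
    intro acc sel u
    rw [suLoopA]
    by_cases h : acc < contrib
    · have hne : t.reverse ++ [q] ≠ [] := by simp
      simp only [List.reverse_cons, h, hne, ne_eq, not_false_iff, and_true, if_pos,
        PySem.List.pyGetD_neg_one_append_singleton, List.dropLast_concat]
      rw [ih]
      simp [takeW, h, PySem.Set.update]
    · simp [List.reverse_cons, h, takeW, PySem.Set.update]

lemma psum_foldl (vals : List (String × Int)) :
    ∀ (ps0 : List Int) (h : ps0 ≠ []),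
      vals.foldl (fun ps q => ps ++ [PySem.List.pyGetD ps (-1) 0 + q.2]) ps0 =
        ps0 ++ tailSums (ps0.getLast h) vals := by
  induction vals with
  | nil => intro ps0 h; simp [tailSums]
  | cons q t ih =>
    intro ps0 h
    simp only [List.foldl_cons]
    rw [PySem.List.pyGetD_neg_one ps0 0 h,
      ih (ps0 ++ [ps0.getLast h + q.2]) (by simp)]
    simp [tailSums]

-- the length of what A takes, as a Nat
def cutN (contrib : Int) : Int → List (String × Int) → Nat
  | a, vals => if contrib ≤ a then 0 else
      match vals with
      | [] => 0
      | q :: t => cutN contrib (a + q.2) t + 1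

lemma find_enum_cut (contrib : Int) :
    ∀ (vals : List (String × Int)) (a : Int) (s : Nat),
      (((PySem.List.enumerate (a :: tailSums a vals) (s : Int)).find?
          (fun ks => decide (contrib ≤ ks.2))).map Prod.fst).getD ((s : Int) + vals.length) =
        (s : Int) + cutN contrib a vals := by
  intro vals
  induction vals with
  | nil =>
    intro a s
    by_cases h : contrib ≤ a <;>
      simp [tailSums, PySem.List.enumerate_cons, PySem.List.enumerate_nil, List.find?, h, cutN]
  | cons q t ih =>
    intro a s
    by_cases h : contrib ≤ a
    · simp [tailSums, PySem.List.enumerate_cons, h, cutN]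
    · rw [cutN, if_neg h, tailSums, PySem.List.enumerate_cons,
        List.find?_cons_of_neg (by simpa using h)]
      have e1 : (s : Int) + 1 = ((s + 1 : Nat) : Int) := by push_cast; ring
      have e2 : (s : Int) + (((q :: t).length : Nat) : Int) =
          ((s + 1 : Nat) : Int) + (t.length : Int) := by
        push_cast [List.length_cons]; ring
      rw [e1, e2, ih (a + q.2) (s + 1)]
      push_cast; ring

lemma take_cutN_eq_takeW (contrib : Int) :
    ∀ (vals : List (String × Int)) (a : Int),
      (vals.take (cutN contrib a vals)).map Prod.fst = takeW contrib a vals := by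
  intro vals
  induction vals with
  | nil => intro a; rw [cutN]; cases h : decide (contrib ≤ a) <;> simp_all [takeW]
  | cons q t ih =>
    intro a
    rw [cutN]
    by_cases h : contrib ≤ a
    · simp [takeW, h, not_lt.mpr h]
    · simp [takeW, h, lt_of_not_ge h, ih]

-- the per-group steps of the two folds agree
lemma step_eq (user_counts : List (String × List (String × Int))) (p : String × Int)
    (sel : PySem.Set String) :
    (suLoopA p.2 0
        (((PySem.Dict.mk user_counts).getD p.1 []).map (fun kv => (kv.1, kv.2))) sel []).1 =
      (let vals := ((PySem.Dict.mk user_counts).getD p.1 []).reverse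
       let psum : List Int := vals.foldl (fun ps q => ps ++ [PySem.List.pyGetD ps (-1) 0 + q.2]) [0]
       let cutoff : Int :=
         (((PySem.List.enumerate psum).find? (fun ks => decide (p.2 ≤ ks.2))).map Prod.fst).getD
           (PySem.List.len vals)
       PySem.Set.update sel ((PySem.List.slice vals none (some cutoff)).map Prod.fst)) := by
  set items := (PySem.Dict.mk user_counts).getD p.1 [] with hitems
  have hmap : items.map (fun kv => (kv.1, kv.2)) = items := by
    simp
  rw [hmap]
  -- A side via the reversed list
  have hA := suLoopA_reverse p.2 items.reverse 0 sel []
  rw [List.reverse_reverse] at hA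
  rw [hA]
  -- B side: psum
  have hps := psum_foldl items.reverse [0] (by simp)
  simp only [List.getLast_singleton] at hps
  simp only [hps]
  -- cutoff
  have hc := find_enum_cut p.2 items.reverse 0 0
  simp only [Nat.cast_zero, zero_add] at hc
  simp only [List.singleton_append]
  rw [PySem.List.len_eq, hc, PySem.List.slice_to_natCast, take_cutN_eq_takeW]

-- ===== VERDICT (by name: the statement is the Claim_ definition above) =====
theorem select_users_spec : Claim_equal_select_users := by
  intro user_counts group_contribs _ _
  unfold Spec_select_users select_users select_users_alt
  congr 1
  funext sel p
  exact step_eq user_counts p sel
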